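-- pv_equiv track=rewrite | github.com/juhinebhnani4/LDIP | backend/app/core/cache_control.py | get_cache_settings
-- ===== SOURCE A (Python) =====
-- CACHEABLE_ENDPOINTS = [
--     # Health endpoints - cache for 30 seconds
--     ("/api/health", 30, 60),
--     ("/api/health/circuits", 30, 60),
--
--     # Static-ish data endpoints - cache for 60 seconds
--     ("/api/matters/{matter_id}/entities", 60, 120),
--     ("/api/matters/{matter_id}/timeline/stats", 60, 120),
--     ("/api/matters/{matter_id}/citations/acts/discovery", 60, 120),
--
--     # Job stats - cache for 5 seconds (frequently polled)
--     ("/api/jobs/matters/{matter_id}/stats", 5, 10),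
--
--     # Summary data - cache for 2 minutes (rarely changes)
--     ("/api/matters/{matter_id}/summary", 120, 300),
--
--     # Timeline events - cache for 30 seconds
--     ("/api/matters/{matter_id}/timeline", 30, 60),
--
--     # Document list - cache for 10 seconds
--     ("/api/matters/{matter_id}/documents", 10, 30),
-- ]
--
-- NO_CACHE_ENDPOINTS = [
--     "/api/chat",
--     "/api/session",
--     "/api/users/me",
--     "/api/auth",
--     "/ws",
-- ]
--
-- def match_path_pattern(path: str, pattern: str) -> bool:
--     """Check if path matches pattern with {param} placeholders."""
--     path_parts = path.strip("/").split("/")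
--     pattern_parts = pattern.strip("/").split("/")
--
--     if len(path_parts) != len(pattern_parts):
--         return False
--
--     for path_part, pattern_part in zip(path_parts, pattern_parts, strict=False):
--         if pattern_part.startswith("{") and pattern_part.endswith("}"):
--             # Parameter placeholder - matches anything
--             continue
--         if path_part != pattern_part:
--             return False
--
--     return True
--
-- def get_cache_settings(path: str) -> tuple[int, int] | None:
--     """Get cache settings for a path.
--
--     Returns:
--         Tuple of (max_age, stale_while_revalidate) or None if not cacheable.
--     """
--     # Check no-cache list first
--     for no_cache_path in NO_CACHE_ENDPOINTS:
--         if path.startswith(no_cache_path):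
--             return None
--
--     # Check cacheable endpoints
--     for pattern, max_age, stale in CACHEABLE_ENDPOINTS:
--         if match_path_pattern(path, pattern):
--             return (max_age, stale)
--
--     return None
-- ===== SOURCE B (Python) =====
-- NO_CACHE_PREFIXES = ("/api/chat", "/api/session", "/api/users/me", "/api/auth", "/ws")
--
-- def _dispatch(segs):
--     """Structural pattern match on the path's segments: the pattern table is
--     compiled away into one match statement ({param} segments become wildcards)."""
--     match segs:
--         case ["api", "health"]:
--             return (30, 60)
--         case ["api", "health", "circuits"]:
--             return (30, 60)
--         case ["api", "jobs", "matters", _, "stats"]: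
--             return (5, 10)
--         case ["api", "matters", _, "entities"]:
--             return (60, 120)
--         case ["api", "matters", _, "summary"]:
--             return (120, 300)
--         case ["api", "matters", _, "timeline"]:
--             return (30, 60)
--         case ["api", "matters", _, "documents"]:
--             return (10, 30)
--         case ["api", "matters", _, "timeline", "stats"]:
--             return (60, 120)
--         case ["api", "matters", _, "citations", "acts", "discovery"]:
--             return (60, 120)
--         case _:
--             return None
--
-- def get_cache_settings(path):
--     if path.startswith(NO_CACHE_PREFIXES):
--         return None
--     return _dispatch(path.strip("/").split("/"))
-- ===== Notes on version B (the rewrite author's own statement) =====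
-- stated objective: simpler
-- what changed: B eliminates the pattern table and the per-pattern strip/split/zip comparison loop entirely: it checks the no-cache prefixes with one startswith(tuple) call and dispatches the split path through a single structural match statement whose cases are the nine endpoint shapes ({param} segments become wildcards).
import Mathlib
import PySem

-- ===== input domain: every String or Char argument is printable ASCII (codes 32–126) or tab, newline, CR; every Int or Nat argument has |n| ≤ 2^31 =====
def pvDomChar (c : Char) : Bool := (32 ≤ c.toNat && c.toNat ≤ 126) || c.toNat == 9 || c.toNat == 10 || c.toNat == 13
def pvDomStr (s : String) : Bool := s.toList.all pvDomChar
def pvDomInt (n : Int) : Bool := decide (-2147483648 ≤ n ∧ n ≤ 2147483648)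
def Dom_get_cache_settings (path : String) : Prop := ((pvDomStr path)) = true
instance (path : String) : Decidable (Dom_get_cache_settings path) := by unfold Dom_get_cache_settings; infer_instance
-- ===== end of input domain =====

-- B erases the pattern table entirely: one structural match on the path's segment
-- list replaces A's loop over patterns with per-pattern re-parse and zip comparison;
-- objective: simpler (no measured speed claim).

-- ===== PORT A =====
-- module constants of A
def pvCacheableEndpoints : List (String × Int × Int) :=
  [("/api/health", 30, 60),
   ("/api/health/circuits", 30, 60),
   ("/api/matters/{matter_id}/entities", 60, 120),
   ("/api/matters/{matter_id}/timeline/stats", 60, 120),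
   ("/api/matters/{matter_id}/citations/acts/discovery", 60, 120),
   ("/api/jobs/matters/{matter_id}/stats", 5, 10),
   ("/api/matters/{matter_id}/summary", 120, 300),
   ("/api/matters/{matter_id}/timeline", 30, 60),
   ("/api/matters/{matter_id}/documents", 10, 30)]

def pvNoCacheEndpoints : List String :=
  ["/api/chat", "/api/session", "/api/users/me", "/api/auth", "/ws"]

-- s.strip("/").split("/"); sep "/" ≠ "" so split? is always `some`
def pvSplitSlash (s : String) : List String :=
  (PySem.Str.split? (PySem.Str.stripChars s "/") "/").getD []

-- A's for-loop over zip(path_parts, pattern_parts) with early return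
def pvMatchZip : List (String × String) → Bool
  | [] => true
  | (a, b) :: rest =>
    if PySem.Str.startswith b "{" && PySem.Str.endswith b "}" then pvMatchZip rest
    else if a ≠ b then false
    else pvMatchZip rest

def match_path_pattern (path pattern : String) : Bool :=
  let pathParts := pvSplitSlash path
  let patternParts := pvSplitSlash pattern
  if pathParts.length ≠ patternParts.length then false
  else pvMatchZip (pathParts.zip patternParts)

-- A's first for-loop (early 'return None' as a boolean hit flag)
def pvLoopNoCache : List String → String → Bool
  | [], _ => false
  | p :: rest, path =>
    if PySem.Str.startswith path p then true else pvLoopNoCache rest path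

-- A's second for-loop
def pvLoopCacheable : List (String × Int × Int) → String → Option (Int × Int)
  | [], _ => none
  | (pat, m, s) :: rest, path =>
    if match_path_pattern path pat then some (m, s) else pvLoopCacheable rest path

def get_cache_settings (path : String) : Option (Int × Int) :=
  if pvLoopNoCache pvNoCacheEndpoints path then none
  else pvLoopCacheable pvCacheableEndpoints path

-- ===== PORT B =====
def pvNoCachePrefixes : List String :=
  ["/api/chat", "/api/session", "/api/users/me", "/api/auth", "/ws"]

-- Source B's _dispatch: Python's match statement on the segment list
def pvDispatch : List String → Option (Int × Int)
  | ["api", "health"] => some (30, 60)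
  | ["api", "health", "circuits"] => some (30, 60)
  | ["api", "jobs", "matters", _, "stats"] => some (5, 10)
  | ["api", "matters", _, "entities"] => some (60, 120)
  | ["api", "matters", _, "summary"] => some (120, 300)
  | ["api", "matters", _, "timeline"] => some (30, 60)
  | ["api", "matters", _, "documents"] => some (10, 30)
  | ["api", "matters", _, "timeline", "stats"] => some (60, 120)
  | ["api", "matters", _, "citations", "acts", "discovery"] => some (60, 120)
  | _ => none

def get_cache_settings_alt (path : String) : Option (Int × Int) :=
  -- path.startswith(tuple) = any of the prefixes matches
  if pvNoCachePrefixes.any (fun p => PySem.Str.startswith path p) then none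
  else pvDispatch (pvSplitSlash path)

-- ===== PRECONDITION & SPEC =====
def Spec_get_cache_settings (path : String) (out : Option (Int × Int)) : Prop := out = get_cache_settings_alt path
instance (path : String) (out : Option (Int × Int)) : Decidable (Spec_get_cache_settings path out) := by unfold Spec_get_cache_settings; infer_instance

-- ===== CLAIM (what is proved, stated in full; the proofs are below) =====
def Claim_equal_get_cache_settings : Prop := ∀ (path : String), Dom_get_cache_settings path → Spec_get_cache_settings path (get_cache_settings path)

-- ===== LEMMAS AND PROOFS =====

theorem pvLoopNoCache_eq_any (l : List String) (path : String) :
    pvLoopNoCache l path = l.any (fun p => PySem.Str.startswith path p) := by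
  induction l with
  | nil => rfl
  | cons p rest ih => simp [pvLoopNoCache, ih]

-- A's pattern test as a function of the path's segment list
def pvAMatch (segs : List String) (pat : String) : Bool :=
  if segs.length ≠ (pvSplitSlash pat).length then false
  else pvMatchZip (segs.zip (pvSplitSlash pat))

theorem match_path_pattern_eq (path pat : String) :
    match_path_pattern path pat = pvAMatch (pvSplitSlash path) pat := rfl

-- A's cacheable loop as a function of the segment list
def pvALoopSegs : List (String × Int × Int) → List String → Option (Int × Int)
  | [], _ => none
  | (pat, m, s) :: rest, segs =>
    if pvAMatch segs pat then some (m, s) else pvALoopSegs rest segs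

theorem pvLoopCacheable_eq_segs (l : List (String × Int × Int)) (path : String) :
    pvLoopCacheable l path = pvALoopSegs l (pvSplitSlash path) := by
  induction l with
  | nil => rfl
  | cons e rest ih =>
    obtain ⟨pat, m, s⟩ := e
    simp only [pvLoopCacheable, pvALoopSegs, match_path_pattern_eq, ih]

-- the heart: A's unrolled loop over the fixed pattern table equals B's structural match
theorem sp1 : pvSplitSlash "/api/health" = ["api","health"] := by decide
theorem sp2 : pvSplitSlash "/api/health/circuits" = ["api","health","circuits"] := by decide
theorem sp3 : pvSplitSlash "/api/matters/{matter_id}/entities" = ["api","matters","{matter_id}","entities"] := by decide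
theorem sp4 : pvSplitSlash "/api/matters/{matter_id}/timeline/stats" = ["api","matters","{matter_id}","timeline","stats"] := by decide
theorem sp5 : pvSplitSlash "/api/matters/{matter_id}/citations/acts/discovery" = ["api","matters","{matter_id}","citations","acts","discovery"] := by decide
theorem sp6 : pvSplitSlash "/api/jobs/matters/{matter_id}/stats" = ["api","jobs","matters","{matter_id}","stats"] := by decide
theorem sp7 : pvSplitSlash "/api/matters/{matter_id}/summary" = ["api","matters","{matter_id}","summary"] := by decide
theorem sp8 : pvSplitSlash "/api/matters/{matter_id}/timeline" = ["api","matters","{matter_id}","timeline"] := by decide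
theorem sp9 : pvSplitSlash "/api/matters/{matter_id}/documents" = ["api","matters","{matter_id}","documents"] := by decide
theorem wY : (PySem.Str.startswith "{matter_id}" "{" && PySem.Str.endswith "{matter_id}" "}") = true := by decide
theorem wN : ∀ s ∈ (["api","health","circuits","matters","jobs","stats","entities","summary","timeline","documents","citations","acts","discovery"] : List String), (PySem.Str.startswith s "{" && PySem.Str.endswith s "}") = false := by decide

theorem pvDispatch_long (a b c d e f g : String) (rest : List String) :
    pvDispatch (a::b::c::d::e::f::g::rest) = none := by
  unfold pvDispatch; split <;> simp_all

set_option maxHeartbeats 1000000 in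
theorem pvALoopSegs_eq_dispatch (segs : List String) :
    pvALoopSegs pvCacheableEndpoints segs = pvDispatch segs := by
  rcases segs with _|⟨a,_|⟨b,_|⟨c,_|⟨d,_|⟨e,_|⟨f,_|⟨g,rest⟩⟩⟩⟩⟩⟩⟩
  · decide
  · simp only [pvALoopSegs, pvCacheableEndpoints, pvAMatch, sp1, sp2, sp3, sp4, sp5, sp6, sp7, sp8, sp9,
      List.length_cons, List.length_nil, List.zip_cons_cons, List.zip_nil_right, List.zip_nil_left,
      pvMatchZip, wY, wN "api" (by decide), wN "health" (by decide), wN "circuits" (by decide),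
      wN "matters" (by decide), wN "jobs" (by decide), wN "stats" (by decide), wN "entities" (by decide),
      wN "summary" (by decide), wN "timeline" (by decide), wN "documents" (by decide),
      wN "citations" (by decide), wN "acts" (by decide), wN "discovery" (by decide),
      Bool.false_eq_true, if_false, if_true]
    simp [pvDispatch]
  · simp only [pvALoopSegs, pvCacheableEndpoints, pvAMatch, sp1, sp2, sp3, sp4, sp5, sp6, sp7, sp8, sp9,
      List.length_cons, List.length_nil, List.zip_cons_cons, List.zip_nil_right, List.zip_nil_left,
      pvMatchZip, wY, wN "api" (by decide), wN "health" (by decide), wN "circuits" (by decide),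
      wN "matters" (by decide), wN "jobs" (by decide), wN "stats" (by decide), wN "entities" (by decide),
      wN "summary" (by decide), wN "timeline" (by decide), wN "documents" (by decide),
      wN "citations" (by decide), wN "acts" (by decide), wN "discovery" (by decide),
      Bool.false_eq_true, if_false, if_true]
    norm_num
    split_ifs <;> simp_all [pvDispatch]
  · simp only [pvALoopSegs, pvCacheableEndpoints, pvAMatch, sp1, sp2, sp3, sp4, sp5, sp6, sp7, sp8, sp9,
      List.length_cons, List.length_nil, List.zip_cons_cons, List.zip_nil_right, List.zip_nil_left,
      pvMatchZip, wY, wN "api" (by decide), wN "health" (by decide), wN "circuits" (by decide),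
      wN "matters" (by decide), wN "jobs" (by decide), wN "stats" (by decide), wN "entities" (by decide),
      wN "summary" (by decide), wN "timeline" (by decide), wN "documents" (by decide),
      wN "citations" (by decide), wN "acts" (by decide), wN "discovery" (by decide),
      Bool.false_eq_true, if_false, if_true]
    norm_num
    split_ifs <;> simp_all [pvDispatch]
  · simp only [pvALoopSegs, pvCacheableEndpoints, pvAMatch, sp1, sp2, sp3, sp4, sp5, sp6, sp7, sp8, sp9,
      List.length_cons, List.length_nil, List.zip_cons_cons, List.zip_nil_right, List.zip_nil_left,
      pvMatchZip, wY, wN "api" (by decide), wN "health" (by decide), wN "circuits" (by decide),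
      wN "matters" (by decide), wN "jobs" (by decide), wN "stats" (by decide), wN "entities" (by decide),
      wN "summary" (by decide), wN "timeline" (by decide), wN "documents" (by decide),
      wN "citations" (by decide), wN "acts" (by decide), wN "discovery" (by decide),
      Bool.false_eq_true, if_false, if_true]
    norm_num
    split_ifs <;> simp_all [pvDispatch]
  · simp only [pvALoopSegs, pvCacheableEndpoints, pvAMatch, sp1, sp2, sp3, sp4, sp5, sp6, sp7, sp8, sp9,
      List.length_cons, List.length_nil, List.zip_cons_cons, List.zip_nil_right, List.zip_nil_left,
      pvMatchZip, wY, wN "api" (by decide), wN "health" (by decide), wN "circuits" (by decide),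
      wN "matters" (by decide), wN "jobs" (by decide), wN "stats" (by decide), wN "entities" (by decide),
      wN "summary" (by decide), wN "timeline" (by decide), wN "documents" (by decide),
      wN "citations" (by decide), wN "acts" (by decide), wN "discovery" (by decide),
      Bool.false_eq_true, if_false, if_true]
    norm_num
    split_ifs <;> simp_all [pvDispatch]
  · simp only [pvALoopSegs, pvCacheableEndpoints, pvAMatch, sp1, sp2, sp3, sp4, sp5, sp6, sp7, sp8, sp9,
      List.length_cons, List.length_nil, List.zip_cons_cons, List.zip_nil_right, List.zip_nil_left,
      pvMatchZip, wY, wN "api" (by decide), wN "health" (by decide), wN "circuits" (by decide),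
      wN "matters" (by decide), wN "jobs" (by decide), wN "stats" (by decide), wN "entities" (by decide),
      wN "summary" (by decide), wN "timeline" (by decide), wN "documents" (by decide),
      wN "citations" (by decide), wN "acts" (by decide), wN "discovery" (by decide),
      Bool.false_eq_true, if_false, if_true]
    norm_num
    split_ifs <;> simp_all [pvDispatch]
  · simp only [pvALoopSegs, pvCacheableEndpoints, pvAMatch, sp1, sp2, sp3, sp4, sp5, sp6, sp7, sp8, sp9,
      List.length_cons, List.length_nil, List.zip_cons_cons, List.zip_nil_right, List.zip_nil_left,
      pvMatchZip, wY, wN "api" (by decide), wN "health" (by decide), wN "circuits" (by decide),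
      wN "matters" (by decide), wN "jobs" (by decide), wN "stats" (by decide), wN "entities" (by decide),
      wN "summary" (by decide), wN "timeline" (by decide), wN "documents" (by decide),
      wN "citations" (by decide), wN "acts" (by decide), wN "discovery" (by decide),
      Bool.false_eq_true, if_false, if_true]
    norm_num
    split_ifs <;>
      first
        | exact (pvDispatch_long a b c d e f g rest).symm
        | (rename_i h; exact absurd h.1 (by omega))

-- ===== VERDICT (by name: the statement is the Claim_ definition above) =====
theorem get_cache_settings_spec : Claim_equal_get_cache_settings := by
  intro path _
  unfold Spec_get_cache_settings get_cache_settings get_cache_settings_alt pvNoCachePrefixes pvNoCacheEndpoints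
  rw [pvLoopNoCache_eq_any]
  by_cases h : ((["/api/chat", "/api/session", "/api/users/me", "/api/auth", "/ws"] : List String).any (fun p => PySem.Str.startswith path p)) = true
  · rw [if_pos h, if_pos h]
  · rw [if_neg h, if_neg h, pvLoopCacheable_eq_segs, pvALoopSegs_eq_dispatch]
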